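-- pv_equiv track=rewrite | github.com/981377660LMT/algorithm-study | 19_数学/卷积/template/gcdConvove/gcdConvove.py | lcm_convolve
-- ===== SOURCE A (Python) =====
-- from typing import List
--
-- MOD = 998244353
--
-- def lcm_convolve(a: List[int], b: List[int]) -> List[int]:
--     add = lambda x, y: (x + y) % MOD
--     inv = lambda x: -x
--     mul = lambda x, y: (x * y) % MOD
--
--     a, b = [0] + a, [0] + b
--     a = divisor_zeta_transform(a, add)
--     b = divisor_zeta_transform(b, add)
--     res = [mul(v1, v2) for v1, v2 in zip(a, b)]
--     res = divisor_mobius_transform(res, add, inv)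
--     return res[1:]
--
-- def divisor_zeta_transform(a, op):
--     n = len(a)
--     res = a[:]
--     prime_table = [1] * n
--     for p in range(2, n):
--         if not prime_table[p]:
--             continue
--         i = 1
--         while i * p < n:
--             res[i * p] = op(res[i], res[i * p])
--             prime_table[i * p] = 0
--             i += 1
--     return res
--
-- def divisor_mobius_transform(a, op, inv):
--     n = len(a)
--     res = a[:]
--     prime_table = [1] * n
--     for p in range(2, n):
--         if not prime_table[p]:
--             continue
--         i = (n - 1) // p
--         while i > 0:
--             res[i * p] = op(inv(res[i]), res[i * p])
--             prime_table[i * p] = 0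
--             i -= 1
--     return res
-- ===== SOURCE B (Python) =====
-- from typing import List
--
-- MOD = 998244353
--
-- def lcm_convolve(a: List[int], b: List[int]) -> List[int]:
--     L = min(len(a), len(b))
--     res = [0] * (L + 1)
--     for i in range(1, L + 1):
--         for j in range(1, L + 1):
--             k = i * j // _gcd(i, j)
--             if k <= L:
--                 res[k] = (res[k] + a[i - 1] * b[j - 1]) % MOD
--     return res[1:]
--
-- def _gcd(x: int, y: int) -> int:
--     while y:
--         x, y = y, x % y
--     return x
-- ===== Notes on version B (the rewrite author's own statement) =====
-- stated objective: simpler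
-- what changed: Replaces the prime-sieve divisor zeta transform, pointwise product and sieve Moebius transform by the direct definition of LCM convolution: one double loop over all index pairs (i,j) accumulating a[i-1]*b[j-1] into bucket lcm(i,j) mod 998244353.
import Mathlib
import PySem

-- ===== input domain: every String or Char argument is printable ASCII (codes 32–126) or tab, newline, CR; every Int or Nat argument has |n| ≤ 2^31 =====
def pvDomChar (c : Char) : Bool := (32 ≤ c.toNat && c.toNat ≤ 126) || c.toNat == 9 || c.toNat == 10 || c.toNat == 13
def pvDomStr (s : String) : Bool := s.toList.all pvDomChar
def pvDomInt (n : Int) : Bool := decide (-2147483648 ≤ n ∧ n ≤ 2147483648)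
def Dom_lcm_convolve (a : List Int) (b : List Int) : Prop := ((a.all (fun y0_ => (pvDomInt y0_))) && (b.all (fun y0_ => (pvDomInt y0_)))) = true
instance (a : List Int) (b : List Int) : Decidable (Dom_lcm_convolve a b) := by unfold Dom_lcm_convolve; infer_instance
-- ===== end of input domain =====

-- B replaces A's prime-sieve zeta/Möbius divisor transforms by the direct double loop over
-- index pairs accumulating into lcm buckets mod 998244353 (simpler; not faster).


-- ===== PORT A =====
def MD : Int := 998244353

def divisor_zeta_transform (a : List Int) (op : Int → Int → Int) : List Int :=
  (((List.range' 2 (a.length - 2)).foldl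
      (fun (st : List Int × List Int) p =>
        if st.2.getD p 0 = 0 then st
        else
          (List.range' 1 ((a.length - 1) / p)).foldl
            (fun s i =>
              (s.1.set (i * p) (op (s.1.getD i 0) (s.1.getD (i * p) 0)),
               s.2.set (i * p) 0))
            st)
      (a, List.replicate a.length 1))).1

def divisor_mobius_transform (a : List Int) (op : Int → Int → Int) (inv : Int → Int) : List Int :=
  (((List.range' 2 (a.length - 2)).foldl
      (fun (st : List Int × List Int) p =>
        if st.2.getD p 0 = 0 then st
        else
          ((List.range' 1 ((a.length - 1) / p)).reverse).foldl
            (fun s i =>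
              (s.1.set (i * p) (op (inv (s.1.getD i 0)) (s.1.getD (i * p) 0)),
               s.2.set (i * p) 0))
            st)
      (a, List.replicate a.length 1))).1

def lcm_convolve (a : List Int) (b : List Int) : List Int :=
  let add : Int → Int → Int := fun x y => PySem.Int.mod (x + y) MD
  let inv : Int → Int := fun x => -x
  let mul : Int → Int → Int := fun x y => PySem.Int.mod (x * y) MD
  let a' := divisor_zeta_transform (0 :: a) add
  let b' := divisor_zeta_transform (0 :: b) add
  let res := (a'.zip b').map fun vw => mul vw.1 vw.2
  let res' := divisor_mobius_transform res add inv
  res'.drop 1  -- res[1:]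

-- ===== PORT B =====
def pyGcd (x y : Nat) : Nat :=
  if h : y = 0 then x else pyGcd y (x % y)
termination_by y
decreasing_by exact Nat.mod_lt _ (Nat.pos_of_ne_zero h)

def lcm_convolve_alt (a : List Int) (b : List Int) : List Int :=
  let L := min a.length b.length
  ((List.range' 1 L).foldl
    (fun r i =>
      (List.range' 1 L).foldl
        (fun r j =>
          let k := i * j / pyGcd i j
          if k ≤ L then
            r.set k (PySem.Int.mod (r.getD k 0 + a.getD (i - 1) 0 * b.getD (j - 1) 0) MD)
          else r)
        r)
    (List.replicate (L + 1) 0)).drop 1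

-- ===== PRECONDITION & SPEC =====
def Spec_lcm_convolve (a : List Int) (b : List Int) (out : List Int) : Prop := out = lcm_convolve_alt a b
instance (a : List Int) (b : List Int) (out : List Int) : Decidable (Spec_lcm_convolve a b out) := by unfold Spec_lcm_convolve; infer_instance

-- ===== CLAIM (what is proved, stated in full; the proofs are below) =====
def Claim_equal_lcm_convolve : Prop := ∀ (a : List Int) (b : List Int), Dom_lcm_convolve a b → Spec_lcm_convolve a b (lcm_convolve a b)

-- ===== LEMMAS AND PROOFS =====

def phi (xs : List Int) (k : ℕ) : ZMod 998244353 := ((xs.getD k 0 : Int) : ZMod 998244353)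

theorem getD_set (xs : List Int) (i j : ℕ) (v : Int) :
    (xs.set i v).getD j 0 = if i = j ∧ i < xs.length then v else xs.getD j 0 := by
  simp only [List.getD_eq_getElem?_getD, List.getElem?_set]
  split_ifs with h1 h2 h3 <;> simp_all <;> omega

theorem phi_set (xs : List Int) (i k : ℕ) (v : Int) :
    phi (xs.set i v) k = if i = k ∧ i < xs.length then ((v : Int) : ZMod 998244353) else phi xs k := by
  unfold phi
  rw [getD_set]
  split_ifs <;> rfl

theorem castmod (x : Int) : ((PySem.Int.mod x MD : Int) : ZMod 998244353) = (x : ZMod 998244353) := by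
  have h := PySem.Int.floordiv_mul_add_mod x MD
  have hm : PySem.Int.mod x MD = x - PySem.Int.floordiv x MD * MD := by omega
  have hc : ((MD : Int) : ZMod 998244353) = 0 := by
    show ((998244353 : Int) : ZMod 998244353) = 0
    exact_mod_cast ZMod.natCast_self 998244353
  rw [hm]; push_cast; rw [hc]; ring

theorem foldl_pair_split {α β ι : Type} (l : List ι) (f : ι → α → α) (g : ι → β → β) (x : α) (y : β) :
    l.foldl (fun s i => (f i s.1, g i s.2)) (x, y)
      = (l.foldl (fun a i => f i a) x, l.foldl (fun b i => g i b) y) := by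
  induction l generalizing x y with
  | nil => rfl
  | cons hd tl ih => simp [List.foldl_cons, ih]

theorem foldl_set_length {ι : Type} (l : List ι) (step : List Int → ι → List Int)
    (h : ∀ r i, (step r i).length = r.length) (res : List Int) :
    (l.foldl step res).length = res.length := by
  induction l generalizing res with
  | nil => rfl
  | cons hd tl ih => rw [List.foldl_cons, ih, h]

def zrun (p t : ℕ) (res : List Int) : List Int :=
  (List.range' 1 t).foldl
    (fun r i => r.set (i * p) (PySem.Int.mod (r.getD i 0 + r.getD (i * p) 0) MD)) res

theorem zrun_len (p t : ℕ) (res : List Int) : (zrun p t res).length = res.length :=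
  foldl_set_length _ _ (fun r i => by simp) res

theorem zrun_phi (p : ℕ) (hp : p.Prime) (n t : ℕ) (ht : t ≤ (n - 1) / p) (res : List Int)
    (hl : res.length = n) : ∀ k, k < n →
    phi (zrun p t res) k =
      if p ∣ k ∧ 1 ≤ k ∧ k ≤ t * p then
        ∑ j ∈ Finset.range (k.factorization p + 1), phi res (k / p ^ j)
      else phi res k := by
  induction t with
  | zero =>
    intro k hk
    rw [if_neg (by omega)]
    rfl
  | succ t ih =>
    have hp2 : 2 ≤ p := hp.two_le
    have hbound : (t + 1) * p < n := by
      have h1 : (t + 1) * p ≤ n - 1 := (Nat.le_div_iff_mul_le (by omega)).mp ht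
      have h2 : 1 ≤ (n - 1) / p := le_trans (by omega) ht
      have h3 : p ≤ n - 1 := by
        have := (Nat.le_div_iff_mul_le (show 0 < p by omega)).mp h2
        omega
      omega
    have ihh := ih (by omega)
    set R := zrun p t res with hR
    have hRlen : R.length = n := by rw [hR, zrun_len, hl]
    have hstep : zrun p (t + 1) res
        = R.set ((1 + t) * p) (PySem.Int.mod (R.getD (1 + t) 0 + R.getD ((1 + t) * p) 0) MD) := by
      rw [zrun, List.range'_concat]
      simp only [List.foldl_append, List.foldl_cons, List.foldl_nil, one_mul]
      rfl
    have h1t : (1 + t) = t + 1 := by omega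
    have hRt1 : phi R (t + 1) = ∑ j ∈ Finset.range ((t + 1).factorization p + 1),
        phi res ((t + 1) / p ^ j) := by
      rw [ihh (t + 1) (by nlinarith)]
      by_cases hpd : p ∣ (t + 1)
      · rw [if_pos ⟨hpd, by omega, by nlinarith [Nat.le_of_dvd (show 0 < t + 1 by omega) hpd]⟩]
      · rw [if_neg (by tauto)]
        rw [Nat.factorization_eq_zero_of_not_dvd hpd]
        simp
    intro k hk
    rw [hstep, phi_set, h1t]
    by_cases hkk : (t + 1) * p = k ∧ (t + 1) * p < R.length
    · rw [if_pos hkk]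
      obtain ⟨hke, _⟩ := hkk
      rw [castmod]
      push_cast
      have hRk : phi R k = phi res k := by
        rw [ihh k hk, if_neg ?_]
        rintro ⟨⟨m, hm⟩, hk1, hk2⟩
        have hmt : m = t + 1 := by
          have : p * (t + 1) = p * m := by rw [← hm, ← hke]; ring
          exact (Nat.eq_of_mul_eq_mul_left (by omega) this).symm
        rw [hm, hmt] at hk2
        nlinarith
      have hgoal1 : ((R.getD (t + 1) 0 : Int) : ZMod 998244353) = phi R (t + 1) := rfl
      have hgoal2 : ((R.getD ((t + 1) * p) 0 : Int) : ZMod 998244353) = phi R k := by rw [hke]; rfl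
      rw [hgoal1, hgoal2, hRt1, hRk]
      rw [if_pos ⟨by rw [← hke]; exact dvd_mul_left p (t + 1),
        by rw [← hke]; exact Nat.one_le_iff_ne_zero.mpr (by positivity), le_of_eq hke.symm⟩]
      have hfac : k.factorization p = (t + 1).factorization p + 1 := by
        rw [← hke, Nat.factorization_mul (by omega) (by omega)]
        simp [hp.factorization_self]
      have hterms : ∀ j : ℕ, k / p ^ (j + 1) = (t + 1) / p ^ j := by
        intro j
        rw [← hke, pow_succ, Nat.mul_div_mul_right _ _ (show 0 < p by omega)]
      have hrhs : ∑ j ∈ Finset.range (k.factorization p + 1), phi res (k / p ^ j)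
          = (∑ j ∈ Finset.range ((t + 1).factorization p + 1), phi res ((t + 1) / p ^ j))
            + phi res k := by
        rw [hfac, Finset.sum_range_succ']
        congr 1
        · exact Finset.sum_congr rfl fun j _ => by rw [hterms j]
        · rw [pow_zero, Nat.div_one]
      rw [hrhs]
    · rw [if_neg hkk, ihh k hk]
      by_cases hct : p ∣ k ∧ 1 ≤ k ∧ k ≤ t * p
      · rw [if_pos hct, if_pos ⟨hct.1, hct.2.1, by nlinarith [hct.2.2]⟩]
      · rw [if_neg hct, if_neg ?_]
        rintro ⟨⟨m, hm⟩, hk1, hk2⟩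
        apply hct
        refine ⟨⟨m, hm⟩, hk1, ?_⟩
        have hmle : m ≤ t + 1 := by
          by_contra hgt
          rw [hm] at hk2
          nlinarith
        have hmne : m ≠ t + 1 := by
          intro heq
          exact hkk ⟨by rw [hm, heq]; ring, by omega⟩
        rw [hm]
        calc p * m ≤ p * t := Nat.mul_le_mul_left p (by omega)
        _ = t * p := by ring

def mrun (p t : ℕ) (res : List Int) : List Int :=
  ((List.range' 1 t).reverse).foldl
    (fun r i => r.set (i * p) (PySem.Int.mod (-(r.getD i 0) + r.getD (i * p) 0) MD)) res

theorem mrun_len (p t : ℕ) (res : List Int) : (mrun p t res).length = res.length :=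
  foldl_set_length _ _ (fun r i => by simp) res

theorem mrun_phi (p : ℕ) (hp2 : 2 ≤ p) (n t : ℕ) (ht : t ≤ (n - 1) / p) (res : List Int)
    (hl : res.length = n) : ∀ k, k < n →
    phi (mrun p t res) k =
      if p ∣ k ∧ 1 ≤ k ∧ k ≤ t * p then phi res k - phi res (k / p) else phi res k := by
  induction t generalizing res with
  | zero =>
    intro k hk
    rw [if_neg (by omega)]
    rfl
  | succ t ih =>
    have hbound : (t + 1) * p < n := by
      have h1 : (t + 1) * p ≤ n - 1 := (Nat.le_div_iff_mul_le (by omega)).mp ht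
      have h2 : 1 ≤ (n - 1) / p := le_trans (by omega) ht
      have h3 : p ≤ n - 1 := by
        have := (Nat.le_div_iff_mul_le (show 0 < p by omega)).mp h2
        omega
      omega
    intro k hk
    set res' := res.set ((1 + t) * p)
      (PySem.Int.mod (-(res.getD (1 + t) 0) + res.getD ((1 + t) * p) 0) MD) with hres'
    have hstep : mrun p (t + 1) res = mrun p t res' := by
      rw [mrun, List.range'_concat, List.reverse_append]
      simp only [List.reverse_cons, List.reverse_nil, List.nil_append, List.cons_append,
        List.foldl_cons, one_mul]
      rfl
    have hlen' : res'.length = n := by rw [hres', List.length_set, hl]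
    have h1t : (1 + t) * p = (t + 1) * p := by ring
    have hne : ∀ m, m ≤ t * p → (1 + t) * p ≠ m := by
      intro m hm
      nlinarith
    have hval : ∀ m, m < n → m ≠ (t + 1) * p → phi res' m = phi res m := by
      intro m hm hmne
      rw [hres', phi_set, if_neg (by rw [h1t]; tauto)]
    rw [hstep, ih (by omega) res' hlen' k hk]
    by_cases hct : p ∣ k ∧ 1 ≤ k ∧ k ≤ t * p
    · rw [if_pos hct, if_pos ⟨hct.1, hct.2.1, by nlinarith [hct.2.2]⟩]
      rw [hval k (by omega) (by intro h; rw [h] at hct; nlinarith [hct.2.2]),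
          hval (k / p) (lt_of_le_of_lt (Nat.div_le_self k p) hk) ?_]
      · intro h
        have : k / p ≤ k := Nat.div_le_self k p
        nlinarith [hct.2.2]
    · rw [if_neg hct]
      by_cases hkk : k = (t + 1) * p
      · rw [if_pos ⟨by rw [hkk]; exact dvd_mul_left p (t + 1),
          by rw [hkk]; exact Nat.one_le_iff_ne_zero.mpr (by positivity), le_of_eq hkk⟩]
        have hkp : k / p = t + 1 := by rw [hkk, Nat.mul_div_cancel _ (by omega)]
        rw [hres', phi_set, h1t, if_pos ⟨hkk.symm, by omega⟩, castmod]
        push_cast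
        rw [hkp]
        have e1 : ((res.getD (1 + t) 0 : Int) : ZMod 998244353) = phi res (t + 1) := by
          rw [show 1 + t = t + 1 by omega]; rfl
        have e2 : ((res.getD ((t + 1) * p) 0 : Int) : ZMod 998244353) = phi res k := by
          rw [← hkk]; rfl
        rw [e1, e2]
        ring
      · rw [if_neg ?_, hval k hk hkk]
        rintro ⟨⟨m, hm⟩, hk1, hk2⟩
        apply hct
        refine ⟨⟨m, hm⟩, hk1, ?_⟩
        have hmle : m ≤ t + 1 := by
          by_contra hgt
          rw [hm] at hk2
          nlinarith
        have hmne : m ≠ t + 1 := by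
          intro heq
          exact hkk (by rw [hm, heq]; ring)
        rw [hm]
        calc p * m ≤ p * t := Nat.mul_le_mul_left p (by omega)
        _ = t * p := by ring

theorem marks_len (p : ℕ) (is : List ℕ) (pt : List Int) :
    (is.foldl (fun b i => b.set (i * p) 0) pt).length = pt.length := by
  induction is generalizing pt with
  | nil => rfl
  | cons hd tl ih => simp [List.foldl_cons, ih]

theorem marks_getD (p : ℕ) (is : List ℕ) (pt : List Int) (q : ℕ) :
    (is.foldl (fun b i => b.set (i * p) 0) pt).getD q 0 =
      if (∃ i ∈ is, i * p = q) ∧ q < pt.length then 0 else pt.getD q 0 := by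
  induction is generalizing pt with
  | nil => simp
  | cons hd tl ih =>
    simp only [List.foldl_cons]
    rw [ih, List.length_set, getD_set]
    by_cases hc3 : (∃ i ∈ hd :: tl, i * p = q) ∧ q < pt.length
    · rw [if_pos hc3]
      by_cases hc1 : (∃ i ∈ tl, i * p = q) ∧ q < pt.length
      · rw [if_pos hc1]
      · rw [if_neg hc1]
        obtain ⟨⟨i, hi, hip⟩, hq⟩ := hc3
        rcases List.mem_cons.mp hi with rfl | hmem
        · rw [if_pos ⟨hip, hip ▸ hq⟩]
        · exact absurd ⟨⟨i, hmem, hip⟩, hq⟩ hc1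
    · rw [if_neg hc3,
        if_neg (fun hc1 => hc3 ⟨⟨hc1.1.choose, List.mem_cons_of_mem _ hc1.1.choose_spec.1, hc1.1.choose_spec.2⟩, hc1.2⟩),
        if_neg (fun (hc2 : hd * p = q ∧ hd * p < pt.length) => hc3 ⟨⟨hd, List.mem_cons_self, hc2.1⟩, hc2.1 ▸ hc2.2⟩)]

def csmooth (u m : ℕ) : Bool := decide (∀ r ∈ m.primeFactors, r < u)

theorem csmooth_iff {u m : ℕ} : csmooth u m = true ↔ ∀ r ∈ m.primeFactors, r < u := by
  simp [csmooth]

theorem csmooth_two {m : ℕ} (hm : m ≠ 0) : csmooth 2 m = true ↔ m = 1 := by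
  rw [csmooth_iff]
  constructor
  · intro h
    by_contra hne
    obtain ⟨r, hr, hrd⟩ := Nat.exists_prime_and_dvd hne
    have := h r (Nat.mem_primeFactors.mpr ⟨hr, hrd, hm⟩)
    have := hr.two_le
    omega
  · rintro rfl
    simp

theorem csmooth_succ_not_prime {u m : ℕ} (hu : ¬ u.Prime) :
    (csmooth (u + 1) m = true) ↔ (csmooth u m = true) := by
  rw [csmooth_iff, csmooth_iff]
  constructor <;> intro h r hr
  · have h1 := h r hr
    have h2 := (Nat.mem_primeFactors.mp hr).1
    have : r ≠ u := fun he => hu (he ▸ h2)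
    omega
  · have := h r hr; omega

theorem csmooth_of_lt {u m : ℕ} (hm : m ≠ 0) (h : m < u) : csmooth u m = true := by
  rw [csmooth_iff]
  intro r hr
  obtain ⟨hp, hd, -⟩ := Nat.mem_primeFactors.mp hr
  exact lt_of_le_of_lt (Nat.le_of_dvd (Nat.pos_of_ne_zero hm) hd) h

theorem div_div_decompose (k d pj : ℕ) (hpd : pj * d ∣ k) (hd0 : d ≠ 0) (hpj0 : pj ≠ 0) :
    k / d = pj * ((k / pj) / d) := by
  obtain ⟨e, he⟩ := hpd
  subst he
  have h1 : pj * d * e / d = pj * e := by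
    rw [show pj * d * e = pj * e * d by ring, Nat.mul_div_cancel _ (Nat.pos_of_ne_zero hd0)]
  have h2 : pj * d * e / pj = d * e := by
    rw [show pj * d * e = d * e * pj by ring, Nat.mul_div_cancel _ (Nat.pos_of_ne_zero hpj0)]
  have h3 : d * e / d = e := by
    rw [mul_comm, Nat.mul_div_cancel _ (Nat.pos_of_ne_zero hd0)]
  rw [h1, h2, h3]

theorem zeta_step_sum (p k : ℕ) (hp : p.Prime) (hk : k ≠ 0) (f : ℕ → ZMod 998244353) :
    ∑ j ∈ Finset.range (k.factorization p + 1),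
      ∑ d ∈ (k / p ^ j).divisors.filter (fun d => csmooth p ((k / p ^ j) / d) = true), f d
    = ∑ d ∈ k.divisors.filter (fun d => csmooth (p + 1) (k / d) = true), f d := by
  have hsig := Finset.sum_sigma (Finset.range (k.factorization p + 1))
    (fun j => (k / p ^ j).divisors.filter (fun d => csmooth p ((k / p ^ j) / d) = true))
    (fun x => f x.2)
  rw [← hsig]
  refine Finset.sum_nbij' (fun x => x.2) (fun d => ⟨(k / d).factorization p, d⟩) ?_ ?_ ?_ ?_ ?_
  · -- forward membership
    rintro ⟨j, d⟩ hmem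
    simp only [Finset.mem_sigma, Finset.mem_range, Finset.mem_filter, Nat.mem_divisors] at hmem ⊢
    obtain ⟨hj, ⟨hdvd, hm0⟩, hsm⟩ := hmem
    have hpj : p ^ j ∣ k := (Nat.Prime.pow_dvd_iff_le_factorization hp hk).mpr (by omega)
    have hm : k / p ^ j ≠ 0 := hm0
    have hd0 : d ≠ 0 := fun h => hm (zero_dvd_iff.mp (h ▸ hdvd))
    have hc0 : (k / p ^ j) / d ≠ 0 := Nat.div_ne_zero_iff.mpr ⟨hd0, Nat.le_of_dvd (Nat.pos_of_ne_zero hm) hdvd⟩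
    have hkd : k / d = p ^ j * ((k / p ^ j) / d) :=
      div_div_decompose k d (p ^ j) ((Nat.dvd_div_iff_mul_dvd hpj).mp hdvd) hd0 (pow_ne_zero _ hp.pos.ne')
    refine ⟨⟨hdvd.trans (Nat.div_dvd_of_dvd hpj), hk⟩, ?_⟩
    rw [csmooth_iff] at hsm ⊢
    intro r hr
    rw [hkd] at hr
    rcases Finset.mem_union.mp (Nat.primeFactors_mul (pow_ne_zero _ hp.pos.ne') hc0 ▸ hr) with h | h
    · have : r = p := by
        obtain ⟨hrp, hrd, -⟩ := Nat.mem_primeFactors.mp h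
        exact (Nat.prime_dvd_prime_iff_eq hrp hp).mp (hrp.dvd_of_dvd_pow hrd)
      omega
    · have := hsm r h; omega
  · -- backward membership
    intro d hmem
    simp only [Finset.mem_filter, Nat.mem_divisors] at hmem
    obtain ⟨⟨hdvd, -⟩, hsm⟩ := hmem
    have hd0 : d ≠ 0 := fun h => hk (zero_dvd_iff.mp (h ▸ hdvd))
    have hkd0 : k / d ≠ 0 := Nat.div_ne_zero_iff.mpr ⟨hd0, Nat.le_of_dvd (Nat.pos_of_ne_zero hk) hdvd⟩
    set j := (k / d).factorization p with hj
    have hpj : p ^ j ∣ k / d := Nat.ordProj_dvd _ _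
    simp only [Finset.mem_sigma, Finset.mem_range, Finset.mem_filter, Nat.mem_divisors]
    have hjle : j ≤ k.factorization p := by
      have h1 : (k / d) ∣ k := Nat.div_dvd_of_dvd hdvd
      exact (Nat.factorization_le_iff_dvd hkd0 hk).mpr h1 p
    have hpjk : p ^ j * d ∣ k := by
      obtain ⟨e, he⟩ := hpj
      exact Dvd.intro e (by rw [← Nat.div_mul_cancel hdvd, he]; ring)
    have hddvd : d ∣ k / p ^ j :=
      (Nat.dvd_div_iff_mul_dvd (dvd_of_mul_right_dvd hpjk)).mpr hpjk
    refine ⟨by omega, ⟨hddvd, Nat.div_ne_zero_iff.mpr ⟨pow_ne_zero _ hp.pos.ne',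
      Nat.le_of_dvd (Nat.pos_of_ne_zero hk) (dvd_of_mul_right_dvd hpjk)⟩⟩, ?_⟩
    have hcomm : (k / p ^ j) / d = (k / d) / p ^ j := by
      rw [Nat.div_div_eq_div_mul, Nat.div_div_eq_div_mul, mul_comm]
    show csmooth p (k / p ^ j / d) = true
    rw [csmooth_iff]
    intro r hr
    rw [hcomm] at hr
    obtain ⟨hrp, hrd, hc0⟩ := Nat.mem_primeFactors.mp hr
    have hrkd : r ∣ k / d := hrd.trans (Nat.div_dvd_of_dvd hpj)
    have hrlt : r < p + 1 := csmooth_iff.mp hsm r (Nat.mem_primeFactors.mpr ⟨hrp, hrkd, hkd0⟩)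
    have hrne : r ≠ p := by
      intro rfl_r
      subst rfl_r
      exact Nat.not_dvd_ordCompl hp hkd0 hrd
    omega
  · -- left inverse
    rintro ⟨j, d⟩ hmem
    simp only [Finset.mem_sigma, Finset.mem_range, Finset.mem_filter, Nat.mem_divisors] at hmem
    obtain ⟨hj, ⟨hdvd, hm0⟩, hsm⟩ := hmem
    have hpj : p ^ j ∣ k := (Nat.Prime.pow_dvd_iff_le_factorization hp hk).mpr (by omega)
    have hd0 : d ≠ 0 := fun h => hm0 (zero_dvd_iff.mp (h ▸ hdvd))
    have hc0 : (k / p ^ j) / d ≠ 0 := Nat.div_ne_zero_iff.mpr ⟨hd0, Nat.le_of_dvd (Nat.pos_of_ne_zero hm0) hdvd⟩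
    have hkd : k / d = p ^ j * ((k / p ^ j) / d) :=
      div_div_decompose k d (p ^ j) ((Nat.dvd_div_iff_mul_dvd hpj).mp hdvd) hd0 (pow_ne_zero _ hp.pos.ne')
    have : (k / d).factorization p = j := by
      rw [hkd, Nat.factorization_mul (pow_ne_zero _ hp.pos.ne') hc0]
      have hnd : ¬ p ∣ ((k / p ^ j) / d) := fun hdv => by
        have := csmooth_iff.mp hsm p (Nat.mem_primeFactors.mpr ⟨hp, hdv, hc0⟩)
        omega
      have hfc : ((k / p ^ j) / d).factorization p = 0 :=
        Nat.factorization_eq_zero_of_not_dvd hnd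
      simp [hp.factorization_pow, hfc]
    simp [this]
  · intro d hmem
    rfl
  · rintro ⟨j, d⟩ hmem
    rfl

theorem mobius_step_sum (p k : ℕ) (hp : p.Prime) (hk : k ≠ 0) (g : ℕ → ZMod 998244353) :
    (∑ x ∈ k.divisorsAntidiagonal.filter (fun x => csmooth p x.1 = true),
        (ArithmeticFunction.moebius x.1) • g x.2)
      - (if p ∣ k then
          ∑ y ∈ (k / p).divisorsAntidiagonal.filter (fun y => csmooth p y.1 = true),
            (ArithmeticFunction.moebius y.1) • g y.2
        else 0)
    = ∑ x ∈ k.divisorsAntidiagonal.filter (fun x => csmooth (p + 1) x.1 = true),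
        (ArithmeticFunction.moebius x.1) • g x.2 := by
  have hx10 : ∀ x ∈ k.divisorsAntidiagonal, x.1 ≠ 0 := by
    intro x hx
    obtain ⟨h1, h2⟩ := Nat.mem_divisorsAntidiagonal.mp hx
    intro h0
    exact h2 (by rw [← h1, h0, zero_mul])
  -- split the RHS index set
  have hsplit : k.divisorsAntidiagonal.filter (fun x => csmooth (p + 1) x.1 = true)
      = k.divisorsAntidiagonal.filter (fun x => csmooth p x.1 = true)
        ∪ k.divisorsAntidiagonal.filter (fun x => csmooth (p + 1) x.1 = true ∧ p ∣ x.1) := by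
    ext x
    simp only [Finset.mem_union, Finset.mem_filter]
    constructor
    · rintro ⟨hmem, hsm⟩
      by_cases hpd : p ∣ x.1
      · exact Or.inr ⟨hmem, hsm, hpd⟩
      · refine Or.inl ⟨hmem, ?_⟩
        rw [csmooth_iff] at hsm ⊢
        intro r hr
        have := hsm r hr
        have : r ≠ p := fun he => hpd (he ▸ (Nat.mem_primeFactors.mp hr).2.1)
        omega
    · rintro (⟨hmem, hsm⟩ | ⟨hmem, hsm, hpd⟩)
      · refine ⟨hmem, ?_⟩
        rw [csmooth_iff] at hsm ⊢
        intro r hr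
        have := hsm r hr
        omega
      · exact ⟨hmem, hsm⟩
  have hdisj : Disjoint (k.divisorsAntidiagonal.filter (fun x => csmooth p x.1 = true))
      (k.divisorsAntidiagonal.filter (fun x => csmooth (p + 1) x.1 = true ∧ p ∣ x.1)) := by
    rw [Finset.disjoint_left]
    rintro x hxA hxB
    obtain ⟨hmem, hsmA⟩ := Finset.mem_filter.mp hxA
    obtain ⟨-, -, hpd⟩ := Finset.mem_filter.mp hxB
    have := csmooth_iff.mp hsmA p (Nat.mem_primeFactors.mpr ⟨hp, hpd, hx10 x hmem⟩)
    omega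
  rw [hsplit, Finset.sum_union hdisj]
  -- now handle the B part
  by_cases hpk : p ∣ k
  · rw [if_pos hpk]
    have hB : ∑ x ∈ k.divisorsAntidiagonal.filter (fun x => csmooth (p + 1) x.1 = true ∧ p ∣ x.1),
        (ArithmeticFunction.moebius x.1) • g x.2
        = ∑ x ∈ k.divisorsAntidiagonal.filter
            (fun x => (csmooth (p + 1) x.1 = true ∧ p ∣ x.1) ∧ ¬ p ∣ x.1 / p),
          (ArithmeticFunction.moebius x.1) • g x.2 := by
      have h1 := (Finset.sum_filter_of_ne
        (s := k.divisorsAntidiagonal.filter (fun x => csmooth (p + 1) x.1 = true ∧ p ∣ x.1))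
        (p := fun x => ¬ p ∣ x.1 / p)
        (f := fun x => (ArithmeticFunction.moebius x.1) • g x.2) ?_).symm
      · rw [Finset.filter_filter] at h1
        exact h1
      intro x hx hne hpd
      have hsq : ¬ Squarefree x.1 := by
        intro hsq
        have hpp : p * p ∣ x.1 := by
          obtain ⟨c, hc⟩ := (Finset.mem_filter.mp hx).2.2
          have hdiv : x.1 / p = c := by rw [hc, Nat.mul_div_cancel_left c hp.pos]
          rw [hdiv] at hpd
          rw [hc]
          exact mul_dvd_mul_left p hpd
        exact hp.ne_one (Nat.isUnit_iff.mp (hsq p hpp))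
      exfalso
      apply hne
      show (ArithmeticFunction.moebius x.1) • g x.2 = 0
      rw [ArithmeticFunction.moebius_eq_zero_of_not_squarefree hsq, zero_smul]
    have hbij : ∑ x ∈ k.divisorsAntidiagonal.filter
            (fun x => (csmooth (p + 1) x.1 = true ∧ p ∣ x.1) ∧ ¬ p ∣ x.1 / p),
          (ArithmeticFunction.moebius x.1) • g x.2
        = ∑ y ∈ (k / p).divisorsAntidiagonal.filter (fun y => csmooth p y.1 = true),
            (-(ArithmeticFunction.moebius y.1)) • g y.2 := by
      refine Finset.sum_nbij' (fun x => (x.1 / p, x.2)) (fun y => (p * y.1, y.2)) ?_ ?_ ?_ ?_ ?_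
      · rintro ⟨x1, x2⟩ hx
        simp only [Finset.mem_filter, Nat.mem_divisorsAntidiagonal] at hx ⊢
        obtain ⟨⟨hprod, -⟩, ⟨hsm, hpd⟩, hnpd⟩ := hx
        obtain ⟨c, hc⟩ := hpd
        subst hc
        have hc0 : c ≠ 0 := by rintro rfl; simp at hprod; omega
        rw [Nat.mul_div_cancel_left c hp.pos] at hnpd ⊢
        refine ⟨⟨?_, ?_⟩, ?_⟩
        · rw [← hprod, show p * c * x2 = (c * x2) * p by ring, Nat.mul_div_cancel _ hp.pos]
        · exact Nat.div_ne_zero_iff.mpr ⟨hp.pos.ne', Nat.le_of_dvd (Nat.pos_of_ne_zero hk) hpk⟩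
        · rw [csmooth_iff] at hsm ⊢
          intro r hr
          obtain ⟨hrp, hrd, -⟩ := Nat.mem_primeFactors.mp hr
          have hrx : r ∣ p * c := hrd.mul_left p
          have := hsm r (Nat.mem_primeFactors.mpr ⟨hrp, hrx, mul_ne_zero hp.pos.ne' hc0⟩)
          have hrne : r ≠ p := fun he => hnpd (he ▸ hrd)
          omega
      · rintro ⟨y1, y2⟩ hy
        simp only [Finset.mem_filter, Nat.mem_divisorsAntidiagonal] at hy ⊢
        obtain ⟨⟨hprod, hkp0⟩, hsm⟩ := hy
        have hy10 : y1 ≠ 0 := by rintro rfl; simp at hprod; omega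
        refine ⟨⟨?_, hk⟩, ⟨?_, Dvd.intro _ rfl⟩, ?_⟩
        · rw [show p * y1 * y2 = p * (y1 * y2) by ring, hprod, Nat.mul_div_cancel' hpk]
        · rw [csmooth_iff] at hsm ⊢
          intro r hr
          obtain ⟨hrp, hrd, -⟩ := Nat.mem_primeFactors.mp hr
          rcases (Nat.Prime.dvd_mul hrp).mp hrd with h | h
          · have : r = p := (Nat.prime_dvd_prime_iff_eq hrp hp).mp h
            omega
          · have := hsm r (Nat.mem_primeFactors.mpr ⟨hrp, h, hy10⟩)
            omega
        · rw [Nat.mul_div_cancel_left y1 hp.pos]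
          intro hpd
          have := csmooth_iff.mp hsm p (Nat.mem_primeFactors.mpr ⟨hp, hpd, hy10⟩)
          omega
      · rintro ⟨x1, x2⟩ hx
        simp only [Finset.mem_filter, Nat.mem_divisorsAntidiagonal] at hx
        obtain ⟨⟨hprod, -⟩, ⟨hsm, hpd⟩, -⟩ := hx
        simp [Nat.mul_div_cancel' hpd]
      · rintro ⟨y1, y2⟩ hy
        simp [Nat.mul_div_cancel_left y1 hp.pos]
      · rintro ⟨x1, x2⟩ hx
        simp only [Finset.mem_filter, Nat.mem_divisorsAntidiagonal] at hx
        obtain ⟨⟨hprod, -⟩, ⟨hsm, hpd⟩, hnpd⟩ := hx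
        obtain ⟨c, hc⟩ := hpd
        subst hc
        rw [Nat.mul_div_cancel_left c hp.pos] at hnpd
        have hcop : Nat.Coprime p c := (Nat.Prime.coprime_iff_not_dvd hp).mpr hnpd
        show (ArithmeticFunction.moebius (p * c)) • g x2
          = (-(ArithmeticFunction.moebius (p * c / p))) • g x2
        rw [Nat.mul_div_cancel_left c hp.pos,
          ArithmeticFunction.IsMultiplicative.map_mul_of_coprime
            ArithmeticFunction.isMultiplicative_moebius hcop,
          ArithmeticFunction.moebius_apply_prime hp, neg_one_mul]
    rw [hB, hbij]
    have hneg : ∑ y ∈ (k / p).divisorsAntidiagonal.filter (fun y => csmooth p y.1 = true),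
          (-(ArithmeticFunction.moebius y.1)) • g y.2
        = -∑ y ∈ (k / p).divisorsAntidiagonal.filter (fun y => csmooth p y.1 = true),
          (ArithmeticFunction.moebius y.1) • g y.2 := by
      rw [← Finset.sum_neg_distrib]
      exact Finset.sum_congr rfl fun y _ => neg_smul ..
    rw [hneg]
    ring
  · rw [if_neg hpk]
    have hempty : k.divisorsAntidiagonal.filter (fun x => csmooth (p + 1) x.1 = true ∧ p ∣ x.1) = ∅ := by
      rw [Finset.filter_eq_empty_iff]
      rintro x hx ⟨-, hpd⟩
      obtain ⟨hprod, -⟩ := Nat.mem_divisorsAntidiagonal.mp hx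
      exact hpk (hprod ▸ hpd.mul_right x.2)
    rw [hempty, Finset.sum_empty]
    ring


def addop : Int → Int → Int := fun x y => PySem.Int.mod (x + y) MD

def zstepA (n : ℕ) : List Int × List Int → ℕ → List Int × List Int :=
  fun st p =>
    if st.2.getD p 0 = 0 then st
    else
      (List.range' 1 ((n - 1) / p)).foldl
        (fun s i =>
          (s.1.set (i * p) (PySem.Int.mod (s.1.getD i 0 + s.1.getD (i * p) 0) MD),
           s.2.set (i * p) 0)) st

theorem zeta_eq (a : List Int) :
    divisor_zeta_transform a addop
      = ((List.range' 2 (a.length - 2)).foldl (zstepA a.length) (a, List.replicate a.length 1)).1 := rfl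

theorem prime_of_no_small_prime (p : ℕ) (h2 : 2 ≤ p)
    (h : ¬ ∃ r, r.Prime ∧ r < p ∧ r ∣ p) : p.Prime := by
  obtain ⟨r, hr, hrd⟩ := Nat.exists_prime_and_dvd (show p ≠ 1 by omega)
  have hle : r ≤ p := Nat.le_of_dvd (by omega) hrd
  rcases eq_or_lt_of_le hle with rfl | hlt
  · exact hr
  · exact absurd ⟨r, hr, hlt, hrd⟩ h

theorem filter_csmooth_two (k : ℕ) (hk : k ≠ 0) :
    k.divisors.filter (fun d => csmooth 2 (k / d) = true) = {k} := by
  ext d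
  simp only [Finset.mem_filter, Nat.mem_divisors, Finset.mem_singleton]
  constructor
  · rintro ⟨⟨hdvd, -⟩, hsm⟩
    have hd0 : d ≠ 0 := fun h => hk (zero_dvd_iff.mp (h ▸ hdvd))
    have h1 : k / d = 1 := (csmooth_two (Nat.div_ne_zero_iff.mpr
      ⟨hd0, Nat.le_of_dvd (Nat.pos_of_ne_zero hk) hdvd⟩)).mp hsm
    have := Nat.div_mul_cancel hdvd
    rw [h1, one_mul] at this
    omega
  · rintro rfl
    refine ⟨⟨dvd_rfl, hk⟩, ?_⟩
    rw [Nat.div_self (Nat.pos_of_ne_zero hk)]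
    rw [csmooth_iff]
    simp

theorem zeta_outer (a0 : List Int) (n : ℕ) (hn : a0.length = n) (m : ℕ) (hm : m ≤ n - 2) :
    ((List.range' 2 m).foldl (zstepA n) (a0, List.replicate n 1)).1.length = n
    ∧ ((List.range' 2 m).foldl (zstepA n) (a0, List.replicate n 1)).2.length = n
    ∧ (∀ q, q < n →
        (((List.range' 2 m).foldl (zstepA n) (a0, List.replicate n 1)).2.getD q 0 = 0
          ↔ 1 ≤ q ∧ ∃ r, r.Prime ∧ r < 2 + m ∧ r ∣ q))
    ∧ (∀ k, 1 ≤ k → k < n →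
        phi ((List.range' 2 m).foldl (zstepA n) (a0, List.replicate n 1)).1 k
          = ∑ d ∈ k.divisors.filter (fun d => csmooth (2 + m) (k / d) = true), phi a0 d) := by
  induction m with
  | zero =>
    simp only [List.range'_zero, List.foldl_nil]
    refine ⟨hn, by simp, fun q hq => ?_, fun k hk1 hkn => ?_⟩
    · rw [List.getD_eq_getElem?_getD]
      simp only [List.getElem?_replicate]
      rw [if_pos hq]
      simp only [Option.getD_some]
      constructor
      · intro h; exact absurd h (by norm_num)
      · rintro ⟨-, r, hr, hrlt, -⟩
        have := hr.two_le
        omega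
    · rw [filter_csmooth_two k (by omega), Finset.sum_singleton]
  | succ m ih =>
    obtain ⟨hl1, hl2, hpt, hres⟩ := ih (by omega)
    set st := (List.range' 2 m).foldl (zstepA n) (a0, List.replicate n 1) with hst
    have hrange : List.range' 2 (m + 1) = List.range' 2 m ++ [2 + m] := by
      rw [List.range'_concat]
      norm_num
    have hstep : (List.range' 2 (m + 1)).foldl (zstepA n) (a0, List.replicate n 1)
        = zstepA n st (2 + m) := by
      rw [hrange, List.foldl_append, List.foldl_cons, List.foldl_nil]
    set p := 2 + m with hp
    have hpn : p < n := by omega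
    rw [hstep]
    by_cases hmark : st.2.getD p 0 = 0
    · -- p is composite: skip
      have hcomp : ¬ p.Prime := by
        obtain ⟨-, r, hr, hrlt, hrd⟩ := (hpt p hpn).mp hmark
        intro hpp
        rcases (Nat.Prime.eq_one_or_self_of_dvd hpp r hrd) with h1 | h1
        · exact hr.ne_one h1
        · omega
      rw [zstepA, if_pos hmark]
      refine ⟨hl1, hl2, fun q hq => ?_, fun k hk1 hkn => ?_⟩
      · rw [hpt q hq]
        constructor
        · rintro ⟨h1, r, hr, hrlt, hrd⟩
          exact ⟨h1, r, hr, by omega, hrd⟩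
        · rintro ⟨h1, r, hr, hrlt, hrd⟩
          refine ⟨h1, r, hr, ?_, hrd⟩
          have : r ≠ p := fun he => hcomp (he ▸ hr)
          omega
      · rw [hres k hk1 hkn]
        refine Finset.sum_congr (Finset.filter_congr fun d hd => ?_) (fun _ _ => rfl)
        have h32 : 2 + (m + 1) = p + 1 := by omega
        rw [h32]
        exact (csmooth_succ_not_prime hcomp).symm
    · -- p is prime: do the pass
      have hprime : p.Prime := by
        apply prime_of_no_small_prime p (by omega)
        intro ⟨r, hr, hrlt, hrd⟩
        exact hmark ((hpt p hpn).mpr ⟨by omega, r, hr, hrlt, hrd⟩)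
      rw [zstepA, if_neg hmark]
      have hsplit : (List.range' 1 ((n - 1) / p)).foldl
          (fun (s : List Int × List Int) i =>
            (s.1.set (i * p) (PySem.Int.mod (s.1.getD i 0 + s.1.getD (i * p) 0) MD),
             s.2.set (i * p) 0)) st
          = (zrun p ((n - 1) / p) st.1,
             (List.range' 1 ((n - 1) / p)).foldl (fun b i => b.set (i * p) 0) st.2) := by
        unfold zrun
        exact foldl_pair_split (List.range' 1 ((n - 1) / p))
          (fun i r => r.set (i * p) (PySem.Int.mod (r.getD i 0 + r.getD (i * p) 0) MD))
          (fun i b => b.set (i * p) 0) st.1 st.2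
      rw [hsplit]
      refine ⟨by rw [zrun_len, hl1], by rw [marks_len, hl2], fun q hq => ?_, fun k hk1 hkn => ?_⟩
      · rw [marks_getD, hl2]
        by_cases hnew : (∃ i ∈ List.range' 1 ((n - 1) / p), i * p = q) ∧ q < n
        · rw [if_pos hnew]
          obtain ⟨⟨i, hi, hip⟩, -⟩ := hnew
          rw [List.mem_range'_1] at hi
          constructor
          · intro _
            have hq1 : 1 ≤ q := by
              have := Nat.mul_pos (show 0 < i by omega) (show 0 < p by omega)
              omega
            refine ⟨hq1, p, hprime, ?_, ⟨i, ?_⟩⟩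
            · omega
            · rw [← hip]; ring
          · intro _
            rfl
        · rw [if_neg hnew, hpt q hq]
          constructor
          · rintro ⟨h1, r, hr, hrlt, hrd⟩
            exact ⟨h1, r, hr, by omega, hrd⟩
          · rintro ⟨h1, r, hr, hrlt, hrd⟩
            refine ⟨h1, r, hr, ?_, hrd⟩
            by_contra hge
            have hrp : r = p := by omega
            subst hrp
            apply hnew
            obtain ⟨i, hi⟩ := hrd
            refine ⟨⟨i, List.mem_range'_1.mpr ⟨?_, ?_⟩, ?_⟩, hq⟩
            · rcases Nat.eq_zero_or_pos i with rfl | hpos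
              · omega
              · omega
            · have hile : i ≤ (n - 1) / p :=
                (Nat.le_div_iff_mul_le (by omega)).mpr (by rw [mul_comm]; omega)
              omega
            · rw [hi]; ring
      · show phi (zrun p ((n - 1) / p) st.1) k = _
        rw [zrun_phi p hprime n ((n - 1) / p) le_rfl st.1 hl1 k hkn]
        have hk0 : k ≠ 0 := by omega
        have h32 : 2 + (m + 1) = p + 1 := by omega
        rw [h32, ← zeta_step_sum p k hprime hk0 (phi a0)]
        by_cases hpk : p ∣ k
        · have hkle : k ≤ ((n - 1) / p) * p := by
            have h1 : k / p ≤ (n - 1) / p := Nat.div_le_div_right (by omega)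
            have h2 : k / p * p = k := Nat.div_mul_cancel hpk
            calc k = k / p * p := h2.symm
            _ ≤ ((n - 1) / p) * p := Nat.mul_le_mul_right p h1
          rw [if_pos ⟨hpk, hk1, hkle⟩]
          refine Finset.sum_congr rfl fun j hj => ?_
          have hj' : j ≤ k.factorization p := by
            have := Finset.mem_range.mp hj
            omega
          have hdvd : p ^ j ∣ k := (Nat.Prime.pow_dvd_iff_le_factorization hprime hk0).mpr hj'
          exact hres (k / p ^ j)
            (Nat.one_le_iff_ne_zero.mpr (Nat.div_ne_zero_iff.mpr ⟨pow_ne_zero _ hprime.pos.ne',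
              Nat.le_of_dvd (by omega) hdvd⟩))
            (lt_of_le_of_lt (Nat.div_le_self _ _) hkn)
        · rw [if_neg (by tauto)]
          have hv0 : k.factorization p = 0 := Nat.factorization_eq_zero_of_not_dvd hpk
          rw [hv0, Finset.sum_range_one]
          simp only [pow_zero, Nat.div_one]
          exact hres k hk1 hkn

def mstepA (n : ℕ) : List Int × List Int → ℕ → List Int × List Int :=
  fun st p =>
    if st.2.getD p 0 = 0 then st
    else
      ((List.range' 1 ((n - 1) / p)).reverse).foldl
        (fun s i =>
          (s.1.set (i * p) (PySem.Int.mod (-(s.1.getD i 0) + s.1.getD (i * p) 0) MD),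
           s.2.set (i * p) 0)) st

theorem mobius_eq (a : List Int) :
    divisor_mobius_transform a addop (fun x => -x)
      = ((List.range' 2 (a.length - 2)).foldl (mstepA a.length) (a, List.replicate a.length 1)).1 := rfl

theorem filter_AD_csmooth_two (k : ℕ) (hk : k ≠ 0) :
    k.divisorsAntidiagonal.filter (fun x => csmooth 2 x.1 = true) = {(1, k)} := by
  ext x
  simp only [Finset.mem_filter, Nat.mem_divisorsAntidiagonal, Finset.mem_singleton]
  constructor
  · rintro ⟨⟨hprod, -⟩, hsm⟩
    have hx0 : x.1 ≠ 0 := fun h => hk (by rw [← hprod, h, zero_mul])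
    have h1 : x.1 = 1 := (csmooth_two hx0).mp hsm
    have h2 : x.2 = k := by rw [← hprod, h1, one_mul]
    exact Prod.ext h1 h2
  · rintro rfl
    refine ⟨⟨one_mul k, hk⟩, ?_⟩
    rw [csmooth_iff]
    simp

theorem mobius_outer (v : List Int) (n : ℕ) (hn : v.length = n) (m : ℕ) (hm : m ≤ n - 2) :
    ((List.range' 2 m).foldl (mstepA n) (v, List.replicate n 1)).1.length = n
    ∧ ((List.range' 2 m).foldl (mstepA n) (v, List.replicate n 1)).2.length = n
    ∧ (∀ q, q < n →
        (((List.range' 2 m).foldl (mstepA n) (v, List.replicate n 1)).2.getD q 0 = 0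
          ↔ 1 ≤ q ∧ ∃ r, r.Prime ∧ r < 2 + m ∧ r ∣ q))
    ∧ (∀ k, 1 ≤ k → k < n →
        phi ((List.range' 2 m).foldl (mstepA n) (v, List.replicate n 1)).1 k
          = ∑ x ∈ k.divisorsAntidiagonal.filter (fun x => csmooth (2 + m) x.1 = true),
              (ArithmeticFunction.moebius x.1) • phi v x.2) := by
  induction m with
  | zero =>
    simp only [List.range'_zero, List.foldl_nil]
    refine ⟨hn, by simp, fun q hq => ?_, fun k hk1 hkn => ?_⟩
    · rw [List.getD_eq_getElem?_getD]
      simp only [List.getElem?_replicate]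
      rw [if_pos hq]
      simp only [Option.getD_some]
      constructor
      · intro h; exact absurd h (by norm_num)
      · rintro ⟨-, r, hr, hrlt, -⟩
        have := hr.two_le
        omega
    · rw [filter_AD_csmooth_two k (by omega), Finset.sum_singleton,
        ArithmeticFunction.moebius_apply_one, one_smul]
  | succ m ih =>
    obtain ⟨hl1, hl2, hpt, hres⟩ := ih (by omega)
    set st := (List.range' 2 m).foldl (mstepA n) (v, List.replicate n 1) with hst
    have hrange : List.range' 2 (m + 1) = List.range' 2 m ++ [2 + m] := by
      rw [List.range'_concat]
      norm_num
    have hstep : (List.range' 2 (m + 1)).foldl (mstepA n) (v, List.replicate n 1)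
        = mstepA n st (2 + m) := by
      rw [hrange, List.foldl_append, List.foldl_cons, List.foldl_nil]
    set p := 2 + m with hp
    have hpn : p < n := by omega
    rw [hstep]
    by_cases hmark : st.2.getD p 0 = 0
    · have hcomp : ¬ p.Prime := by
        obtain ⟨-, r, hr, hrlt, hrd⟩ := (hpt p hpn).mp hmark
        intro hpp
        rcases (Nat.Prime.eq_one_or_self_of_dvd hpp r hrd) with h1 | h1
        · exact hr.ne_one h1
        · omega
      rw [mstepA, if_pos hmark]
      refine ⟨hl1, hl2, fun q hq => ?_, fun k hk1 hkn => ?_⟩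
      · rw [hpt q hq]
        constructor
        · rintro ⟨h1, r, hr, hrlt, hrd⟩
          exact ⟨h1, r, hr, by omega, hrd⟩
        · rintro ⟨h1, r, hr, hrlt, hrd⟩
          refine ⟨h1, r, hr, ?_, hrd⟩
          have : r ≠ p := fun he => hcomp (he ▸ hr)
          omega
      · rw [hres k hk1 hkn]
        refine Finset.sum_congr (Finset.filter_congr fun x hx => ?_) (fun _ _ => rfl)
        have h32 : 2 + (m + 1) = p + 1 := by omega
        rw [h32]
        exact (csmooth_succ_not_prime hcomp).symm
    · have hprime : p.Prime := by
        apply prime_of_no_small_prime p (by omega)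
        intro ⟨r, hr, hrlt, hrd⟩
        exact hmark ((hpt p hpn).mpr ⟨by omega, r, hr, hrlt, hrd⟩)
      rw [mstepA, if_neg hmark]
      have hsplit : ((List.range' 1 ((n - 1) / p)).reverse).foldl
          (fun (s : List Int × List Int) i =>
            (s.1.set (i * p) (PySem.Int.mod (-(s.1.getD i 0) + s.1.getD (i * p) 0) MD),
             s.2.set (i * p) 0)) st
          = (mrun p ((n - 1) / p) st.1,
             ((List.range' 1 ((n - 1) / p)).reverse).foldl (fun b i => b.set (i * p) 0) st.2) := by
        unfold mrun
        exact foldl_pair_split ((List.range' 1 ((n - 1) / p)).reverse)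
          (fun i r => r.set (i * p) (PySem.Int.mod (-(r.getD i 0) + r.getD (i * p) 0) MD))
          (fun i b => b.set (i * p) 0) st.1 st.2
      rw [hsplit]
      refine ⟨by rw [mrun_len, hl1], by rw [marks_len, hl2], fun q hq => ?_, fun k hk1 hkn => ?_⟩
      · rw [marks_getD, hl2]
        by_cases hnew : (∃ i ∈ (List.range' 1 ((n - 1) / p)).reverse, i * p = q) ∧ q < n
        · rw [if_pos hnew]
          obtain ⟨⟨i, hi, hip⟩, -⟩ := hnew
          rw [List.mem_reverse, List.mem_range'_1] at hi
          constructor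
          · intro _
            have hq1 : 1 ≤ q := by
              have := Nat.mul_pos (show 0 < i by omega) (show 0 < p by omega)
              omega
            refine ⟨hq1, p, hprime, ?_, ⟨i, ?_⟩⟩
            · omega
            · rw [← hip]; ring
          · intro _
            rfl
        · rw [if_neg hnew, hpt q hq]
          constructor
          · rintro ⟨h1, r, hr, hrlt, hrd⟩
            exact ⟨h1, r, hr, by omega, hrd⟩
          · rintro ⟨h1, r, hr, hrlt, hrd⟩
            refine ⟨h1, r, hr, ?_, hrd⟩
            by_contra hge
            have hrp : r = p := by omega
            subst hrp
            apply hnew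
            obtain ⟨i, hi⟩ := hrd
            refine ⟨⟨i, List.mem_reverse.mpr (List.mem_range'_1.mpr ⟨?_, ?_⟩), ?_⟩, hq⟩
            · rcases Nat.eq_zero_or_pos i with rfl | hpos
              · omega
              · omega
            · have hile : i ≤ (n - 1) / p :=
                (Nat.le_div_iff_mul_le (by omega)).mpr (by rw [mul_comm]; omega)
              omega
            · rw [hi]; ring
      · show phi (mrun p ((n - 1) / p) st.1) k = _
        rw [mrun_phi p hprime.two_le n ((n - 1) / p) le_rfl st.1 hl1 k hkn]
        have hk0 : k ≠ 0 := by omega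
        have h32 : 2 + (m + 1) = p + 1 := by omega
        rw [h32, ← mobius_step_sum p k hprime hk0 (phi v)]
        by_cases hpk : p ∣ k
        · have hkle : k ≤ ((n - 1) / p) * p := by
            have h1 : k / p ≤ (n - 1) / p := Nat.div_le_div_right (by omega)
            have h2 : k / p * p = k := Nat.div_mul_cancel hpk
            calc k = k / p * p := h2.symm
            _ ≤ ((n - 1) / p) * p := Nat.mul_le_mul_right p h1
          rw [if_pos ⟨hpk, hk1, hkle⟩, if_pos hpk]
          have hkp1 : 1 ≤ k / p := Nat.one_le_iff_ne_zero.mpr (Nat.div_ne_zero_iff.mpr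
            ⟨hprime.pos.ne', Nat.le_of_dvd (by omega) hpk⟩)
          rw [hres k hk1 hkn, hres (k / p) hkp1 (lt_of_le_of_lt (Nat.div_le_self _ _) hkn)]
        · rw [if_neg (by tauto), if_neg hpk, hres k hk1 hkn, sub_zero]

theorem modb (x : Int) : 0 ≤ PySem.Int.mod x MD ∧ PySem.Int.mod x MD < MD :=
  ⟨PySem.Int.mod_nonneg x (by norm_num [MD]), PySem.Int.mod_lt x (by norm_num [MD])⟩

theorem int_eq_of_cast (x y : Int) (hx : 0 ≤ x ∧ x < MD) (hy : 0 ≤ y ∧ y < MD)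
    (h : (x : ZMod 998244353) = (y : ZMod 998244353)) : x = y := by
  rw [ZMod.intCast_eq_intCast_iff] at h
  have := h.dvd
  simp only [MD] at hx hy
  omega

theorem phi_getElem (l : List Int) (k : ℕ) (hk : k < l.length) :
    phi l k = ((l[k] : Int) : ZMod 998244353) := by
  unfold phi
  rw [List.getD_eq_getElem?_getD, List.getElem?_eq_getElem hk]
  rfl

theorem foldl_bounds {ι : Type} (l : List ι) (step : List Int → ι → List Int)
    (hstep : ∀ r i, (∀ x ∈ r, 0 ≤ x ∧ x < MD) → ∀ x ∈ step r i, 0 ≤ x ∧ x < MD)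
    (st : List Int) (hb : ∀ x ∈ st, 0 ≤ x ∧ x < MD) :
    ∀ x ∈ l.foldl step st, 0 ≤ x ∧ x < MD := by
  induction l generalizing st with
  | nil => exact hb
  | cons hd tl ih => exact ih (step st hd) (hstep st hd hb)

theorem foldl_bounds_pair {ι : Type} (l : List ι)
    (step : List Int × List Int → ι → List Int × List Int)
    (hstep : ∀ s i, (∀ x ∈ s.1, 0 ≤ x ∧ x < MD) → ∀ x ∈ (step s i).1, 0 ≤ x ∧ x < MD)
    (st : List Int × List Int) (hb : ∀ x ∈ st.1, 0 ≤ x ∧ x < MD) :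
    ∀ x ∈ (l.foldl step st).1, 0 ≤ x ∧ x < MD := by
  induction l generalizing st with
  | nil => exact hb
  | cons hd tl ih => exact ih (step st hd) (hstep st hd hb)

theorem set_mod_bounds (r : List Int) (ix : ℕ) (v : Int)
    (hb : ∀ x ∈ r, 0 ≤ x ∧ x < MD) :
    ∀ x ∈ r.set ix (PySem.Int.mod v MD), 0 ≤ x ∧ x < MD := by
  intro x hx
  rcases List.mem_or_eq_of_mem_set hx with h | rfl
  · exact hb x h
  · exact modb v

theorem mobius_bounds (v : List Int) (hb : ∀ x ∈ v, 0 ≤ x ∧ x < MD) :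
    ∀ x ∈ divisor_mobius_transform v addop (fun x => -x), 0 ≤ x ∧ x < MD := by
  rw [mobius_eq]
  refine foldl_bounds_pair _ _ ?_ _ (by simpa using hb)
  intro s p hs
  show ∀ x ∈ (mstepA v.length s p).1, _
  rw [mstepA]
  split_ifs with h
  · exact hs
  · refine foldl_bounds_pair _ _ ?_ _ hs
    intro s' i hs'
    exact set_mod_bounds _ _ _ hs'

theorem zeta_length (a : List Int) : (divisor_zeta_transform a addop).length = a.length := by
  rw [zeta_eq]
  exact (zeta_outer a a.length rfl (a.length - 2) le_rfl).1

theorem mobius_length (a : List Int) :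
    (divisor_mobius_transform a addop (fun x => -x)).length = a.length := by
  rw [mobius_eq]
  exact (mobius_outer a a.length rfl (a.length - 2) le_rfl).1

theorem zeta_phi (a : List Int) (k : ℕ) (hk1 : 1 ≤ k) (hkn : k < a.length) :
    phi (divisor_zeta_transform a addop) k = ∑ d ∈ k.divisors, phi a d := by
  rw [zeta_eq]
  obtain ⟨-, -, -, hres⟩ := zeta_outer a a.length rfl (a.length - 2) le_rfl
  have hall : ∀ d ∈ k.divisors, csmooth (2 + (a.length - 2)) (k / d) = true := by
    intro d hd
    obtain ⟨hdvd, hk0⟩ := Nat.mem_divisors.mp hd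
    have hd0 : d ≠ 0 := fun h => hk0 (zero_dvd_iff.mp (h ▸ hdvd))
    apply csmooth_of_lt
    · exact Nat.div_ne_zero_iff.mpr ⟨hd0, Nat.le_of_dvd (by omega) hdvd⟩
    · have : k / d ≤ k := Nat.div_le_self k d
      omega
  rw [hres k hk1 hkn, Finset.filter_true_of_mem hall]

theorem mobius_phi (v : List Int) (k : ℕ) (hk1 : 1 ≤ k) (hkn : k < v.length) :
    phi (divisor_mobius_transform v addop (fun x => -x)) k
      = ∑ x ∈ k.divisorsAntidiagonal, (ArithmeticFunction.moebius x.1) • phi v x.2 := by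
  rw [mobius_eq]
  obtain ⟨-, -, -, hres⟩ := mobius_outer v v.length rfl (v.length - 2) le_rfl
  have hall : ∀ x ∈ k.divisorsAntidiagonal, csmooth (2 + (v.length - 2)) x.1 = true := by
    intro x hx
    obtain ⟨hprod, hk0⟩ := Nat.mem_divisorsAntidiagonal.mp hx
    have hx0 : x.1 ≠ 0 := fun h => hk0 (by rw [← hprod, h, zero_mul])
    apply csmooth_of_lt hx0
    have hdvd : x.1 ∣ k := Dvd.intro _ hprod
    have : x.1 ≤ k := Nat.le_of_dvd (by omega) hdvd
    omega
  rw [hres k hk1 hkn, Finset.filter_true_of_mem hall]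

/-- value fed into bucket sums: `a[i-1]` zero-extended. -/
def alphaF (a : List Int) (i : ℕ) : ZMod 998244353 := ((a.getD (i - 1) 0 : Int) : ZMod 998244353)

/-- divisor-sum (zeta) of `alphaF`. -/
def Zf (a : List Int) (k : ℕ) : ZMod 998244353 := ∑ i ∈ k.divisors, alphaF a i

/-- the lcm-bucket sum: value of the lcm convolution at index `k`. -/
def FF (a b : List Int) (k : ℕ) : ZMod 998244353 :=
  ∑ i ∈ k.divisors, ∑ j ∈ k.divisors, (if Nat.lcm i j = k then alphaF a i * alphaF b j else 0)

theorem pyGcd_eq (x y : ℕ) : pyGcd x y = Nat.gcd x y := by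
  induction y using Nat.strong_induction_on generalizing x with
  | _ y ih =>
    rw [pyGcd]
    split_ifs with h
    · subst h; simp
    · rw [ih (x % y) (Nat.mod_lt x (Nat.pos_of_ne_zero h)) y, Nat.gcd_comm y (x % y),
        Nat.gcd_comm x y, Nat.gcd_rec y x]

theorem lcm_eq (i j : ℕ) : i * j / pyGcd i j = Nat.lcm i j := by
  rw [pyGcd_eq]
  rfl

/-- one inner pass of B (fixed i, j running over 1..t) -/
theorem binner_phi (a b : List Int) (L i t : ℕ) (r : List Int) (hlen : r.length = L + 1) :
    ((List.range' 1 t).foldl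
      (fun r j =>
        if i * j / pyGcd i j ≤ L then
          r.set (i * j / pyGcd i j)
            (PySem.Int.mod (r.getD (i * j / pyGcd i j) 0
              + a.getD (i - 1) 0 * b.getD (j - 1) 0) MD)
        else r) r).length = L + 1
    ∧ ∀ k, 1 ≤ k → k ≤ L →
      phi ((List.range' 1 t).foldl
        (fun r j =>
          if i * j / pyGcd i j ≤ L then
            r.set (i * j / pyGcd i j)
              (PySem.Int.mod (r.getD (i * j / pyGcd i j) 0
                + a.getD (i - 1) 0 * b.getD (j - 1) 0) MD)
          else r) r) k
        = phi r k + ∑ j ∈ Finset.Icc 1 t,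
            (if Nat.lcm i j = k then alphaF a i * alphaF b j else 0) := by
  induction t with
  | zero =>
    refine ⟨hlen, fun k hk1 hkL => ?_⟩
    simp
  | succ t ih =>
    obtain ⟨ihl, ihres⟩ := ih
    have hrange : List.range' 1 (t + 1) = List.range' 1 t ++ [1 + t] := by
      rw [List.range'_concat]
      norm_num
    rw [hrange]
    simp only [List.foldl_append, List.foldl_cons, List.foldl_nil]
    set R := (List.range' 1 t).foldl
      (fun r j =>
        if i * j / pyGcd i j ≤ L then
          r.set (i * j / pyGcd i j)
            (PySem.Int.mod (r.getD (i * j / pyGcd i j) 0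
              + a.getD (i - 1) 0 * b.getD (j - 1) 0) MD)
        else r) r with hR
    have h1t : 1 + t = t + 1 := by omega
    rw [h1t, lcm_eq i (t + 1)]
    by_cases hle : Nat.lcm i (t + 1) ≤ L
    · rw [if_pos hle]
      refine ⟨by rw [List.length_set, ihl], fun k hk1 hkL => ?_⟩
      rw [phi_set, ihl]
      rw [Finset.sum_Icc_succ_top (by omega : 1 ≤ t + 1)]
      by_cases hkk : Nat.lcm i (t + 1) = k
      · rw [if_pos ⟨hkk, by omega⟩, castmod]
        push_cast
        have e1 : ((R.getD (Nat.lcm i (t + 1)) 0 : Int) : ZMod 998244353)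
            = phi R (Nat.lcm i (t + 1)) := rfl
        rw [e1, hkk, ihres k hk1 hkL, if_pos rfl]
        unfold alphaF
        push_cast
        ring
      · rw [if_neg (by tauto), ihres k hk1 hkL, if_neg hkk, add_zero]
    · rw [if_neg hle]
      refine ⟨ihl, fun k hk1 hkL => ?_⟩
      rw [ihres k hk1 hkL, Finset.sum_Icc_succ_top (by omega : 1 ≤ t + 1)]
      rw [if_neg (fun h => hle (by omega)), add_zero]

/-- the outer loop of B -/
theorem bouter_phi (a b : List Int) (L t : ℕ) (r : List Int) (hlen : r.length = L + 1) :
    ((List.range' 1 t).foldl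
      (fun r i =>
        (List.range' 1 L).foldl
          (fun r j =>
            if i * j / pyGcd i j ≤ L then
              r.set (i * j / pyGcd i j)
                (PySem.Int.mod (r.getD (i * j / pyGcd i j) 0
                  + a.getD (i - 1) 0 * b.getD (j - 1) 0) MD)
            else r) r) r).length = L + 1
    ∧ ∀ k, 1 ≤ k → k ≤ L →
      phi ((List.range' 1 t).foldl
        (fun r i =>
          (List.range' 1 L).foldl
            (fun r j =>
              if i * j / pyGcd i j ≤ L then
                r.set (i * j / pyGcd i j)
                  (PySem.Int.mod (r.getD (i * j / pyGcd i j) 0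
                    + a.getD (i - 1) 0 * b.getD (j - 1) 0) MD)
              else r) r) r) k
        = phi r k + ∑ i ∈ Finset.Icc 1 t, ∑ j ∈ Finset.Icc 1 L,
            (if Nat.lcm i j = k then alphaF a i * alphaF b j else 0) := by
  induction t with
  | zero =>
    refine ⟨hlen, fun k hk1 hkL => ?_⟩
    simp
  | succ t ih =>
    obtain ⟨ihl, ihres⟩ := ih
    have hrange : List.range' 1 (t + 1) = List.range' 1 t ++ [1 + t] := by
      rw [List.range'_concat]
      norm_num
    rw [hrange]
    simp only [List.foldl_append, List.foldl_cons, List.foldl_nil]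
    obtain ⟨hl2, hres2⟩ := binner_phi a b L (1 + t) L _ ihl
    refine ⟨hl2, fun k hk1 hkL => ?_⟩
    rw [hres2 k hk1 hkL, ihres k hk1 hkL, Finset.sum_Icc_succ_top (by omega : 1 ≤ t + 1)]
    have h1t : 1 + t = t + 1 := by omega
    rw [h1t]
    ring

theorem FF_eq_Icc (a b : List Int) (L k : ℕ) (hk1 : 1 ≤ k) (hkL : k ≤ L) :
    ∑ i ∈ Finset.Icc 1 L, ∑ j ∈ Finset.Icc 1 L,
        (if Nat.lcm i j = k then alphaF a i * alphaF b j else 0)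
      = FF a b k := by
  unfold FF
  have hsub : k.divisors ⊆ Finset.Icc 1 L := by
    intro d hd
    obtain ⟨hdvd, hk0⟩ := Nat.mem_divisors.mp hd
    have hd0 : d ≠ 0 := fun h => hk0 (zero_dvd_iff.mp (h ▸ hdvd))
    exact Finset.mem_Icc.mpr ⟨by omega, le_trans (Nat.le_of_dvd (by omega) hdvd) hkL⟩
  have hz2 : ∀ i : ℕ, ∀ j ∈ Finset.Icc 1 L, j ∉ k.divisors →
      (if Nat.lcm i j = k then alphaF a i * alphaF b j else 0) = 0 := by
    intro i j hj hjn
    rw [if_neg ?_]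
    intro hlcm
    exact hjn (Nat.mem_divisors.mpr ⟨hlcm ▸ Nat.dvd_lcm_right i j, by omega⟩)
  have hinner : ∀ i : ℕ,
      (∑ j ∈ k.divisors, (if Nat.lcm i j = k then alphaF a i * alphaF b j else 0))
        = ∑ j ∈ Finset.Icc 1 L, (if Nat.lcm i j = k then alphaF a i * alphaF b j else 0) :=
    fun i => Finset.sum_subset hsub (hz2 i)
  have hz1 : ∀ i ∈ Finset.Icc 1 L, i ∉ k.divisors →
      (∑ j ∈ Finset.Icc 1 L, (if Nat.lcm i j = k then alphaF a i * alphaF b j else 0)) = 0 := by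
    intro i hi hin
    refine Finset.sum_eq_zero fun j hj => ?_
    rw [if_neg ?_]
    intro hlcm
    exact hin (Nat.mem_divisors.mpr ⟨hlcm ▸ Nat.dvd_lcm_left i j, by omega⟩)
  have houter := Finset.sum_subset hsub hz1
  rw [← houter]
  exact Finset.sum_congr rfl fun i hi => (hinner i).symm

theorem comb (a b : List Int) : ∀ k, 0 < k →
    ∑ d ∈ k.divisors, FF a b d = Zf a k * Zf b k := by
  intro k hk
  have hk0 : k ≠ 0 := by omega
  have hext : ∀ d ∈ k.divisors, FF a b d
      = ∑ i ∈ k.divisors, ∑ j ∈ k.divisors,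
          (if Nat.lcm i j = d then alphaF a i * alphaF b j else 0) := by
    intro d hd
    obtain ⟨hdvd, -⟩ := Nat.mem_divisors.mp hd
    have hd0 : d ≠ 0 := fun h => hk0 (zero_dvd_iff.mp (h ▸ hdvd))
    have hsub : d.divisors ⊆ k.divisors := Nat.divisors_subset_of_dvd hk0 hdvd
    unfold FF
    have hinner : ∀ i : ℕ,
        (∑ j ∈ d.divisors, (if Nat.lcm i j = d then alphaF a i * alphaF b j else 0))
          = ∑ j ∈ k.divisors, (if Nat.lcm i j = d then alphaF a i * alphaF b j else 0) := by
      intro i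
      refine Finset.sum_subset hsub fun j hj hjn => ?_
      have hne : Nat.lcm i j ≠ d := fun hlcm =>
        hjn (Nat.mem_divisors.mpr ⟨hlcm ▸ Nat.dvd_lcm_right i j, hd0⟩)
      rw [if_neg hne]
    rw [Finset.sum_congr rfl (fun i _ => hinner i)]
    refine Finset.sum_subset hsub fun i hi hin => Finset.sum_eq_zero fun j hj => ?_
    have hne : Nat.lcm i j ≠ d := fun hlcm =>
      hin (Nat.mem_divisors.mpr ⟨hlcm ▸ Nat.dvd_lcm_left i j, hd0⟩)
    rw [if_neg hne]
  rw [Finset.sum_congr rfl hext]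
  unfold Zf
  rw [Finset.sum_mul_sum]
  rw [Finset.sum_comm]
  refine Finset.sum_congr rfl fun i hi => ?_
  rw [Finset.sum_comm]
  refine Finset.sum_congr rfl fun j hj => ?_
  rw [Finset.sum_ite_eq k.divisors (Nat.lcm i j) (fun _ => alphaF a i * alphaF b j),
    if_pos (Nat.mem_divisors.mpr ⟨Nat.lcm_dvd (Nat.mem_divisors.mp hi).1
      (Nat.mem_divisors.mp hj).1, hk0⟩)]

theorem mob_inv (a b : List Int) : ∀ k, 0 < k →
    ∑ x ∈ k.divisorsAntidiagonal,
        (ArithmeticFunction.moebius x.1) • (Zf a x.2 * Zf b x.2) = FF a b k :=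
  ArithmeticFunction.sum_eq_iff_sum_smul_moebius_eq.mp (comb a b)

theorem phi_replicate (n k : ℕ) : phi (List.replicate n (0 : Int)) k = 0 := by
  unfold phi
  rw [List.getD_eq_getElem?_getD]
  simp only [List.getElem?_replicate]
  split_ifs <;> simp

theorem phi_cons (a : List Int) (d : ℕ) (hd : 1 ≤ d) : phi (0 :: a) d = alphaF a d := by
  obtain ⟨m, rfl⟩ : ∃ m, d = m + 1 := ⟨d - 1, by omega⟩
  unfold phi alphaF
  rw [List.getD_cons_succ]
  congr 1

-- ===== VERDICT (by name: the statement is the Claim_ definition above) =====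
theorem lcm_convolve_spec : Claim_equal_lcm_convolve := by
  intro a b _hdom
  unfold Spec_lcm_convolve
  have hA : lcm_convolve a b
      = (divisor_mobius_transform
          (((divisor_zeta_transform (0 :: a) addop).zip
              (divisor_zeta_transform (0 :: b) addop)).map
            (fun vw => PySem.Int.mod (vw.1 * vw.2) MD))
          addop (fun x => -x)).drop 1 := rfl
  have hB : lcm_convolve_alt a b
      = ((List.range' 1 (min a.length b.length)).foldl
          (fun r i =>
            (List.range' 1 (min a.length b.length)).foldl
              (fun r j =>
                if i * j / pyGcd i j ≤ min a.length b.length then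
                  r.set (i * j / pyGcd i j)
                    (PySem.Int.mod (r.getD (i * j / pyGcd i j) 0
                      + a.getD (i - 1) 0 * b.getD (j - 1) 0) MD)
                else r) r)
          (List.replicate (min a.length b.length + 1) 0)).drop 1 := rfl
  rw [hA, hB]
  set L := min a.length b.length with hL
  set za := divisor_zeta_transform (0 :: a) addop with hza
  set zb := divisor_zeta_transform (0 :: b) addop with hzb
  set P := ((za.zip zb).map (fun vw => PySem.Int.mod (vw.1 * vw.2) MD)) with hP
  set M := divisor_mobius_transform P addop (fun x => -x) with hM
  set B := (List.range' 1 L).foldl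
      (fun r i =>
        (List.range' 1 L).foldl
          (fun r j =>
            if i * j / pyGcd i j ≤ L then
              r.set (i * j / pyGcd i j)
                (PySem.Int.mod (r.getD (i * j / pyGcd i j) 0
                  + a.getD (i - 1) 0 * b.getD (j - 1) 0) MD)
            else r) r)
      (List.replicate (L + 1) 0) with hBdef
  have hzalen : za.length = a.length + 1 := by rw [hza, zeta_length]; rfl
  have hzblen : zb.length = b.length + 1 := by rw [hzb, zeta_length]; rfl
  have hPlen : P.length = L + 1 := by
    rw [hP, List.length_map, List.length_zip, hzalen, hzblen, hL]
    omega
  have hMlen : M.length = L + 1 := by rw [hM, mobius_length, hPlen]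
  have hBfacts := bouter_phi a b L L (List.replicate (L + 1) 0) (by simp)
  have hBlen : B.length = L + 1 := hBfacts.1
  -- values of the product list
  have hPphi : ∀ k, 1 ≤ k → k ≤ L → phi P k = Zf a k * Zf b k := by
    intro k hk1 hkL
    have hkP : k < P.length := by omega
    have hkza : k < za.length := by omega
    have hkzb : k < zb.length := by omega
    have hkzip : k < (za.zip zb).length := by rw [List.length_zip]; omega
    rw [phi_getElem P k hkP]
    simp only [hP, List.getElem_map, List.getElem_zip]
    rw [castmod]
    push_cast
    have e1 : ((za[k] : Int) : ZMod 998244353) = phi za k := (phi_getElem za k hkza).symm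
    have e2 : ((zb[k] : Int) : ZMod 998244353) = phi zb k := (phi_getElem zb k hkzb).symm
    rw [e1, e2, hza, hzb]
    rw [zeta_phi (0 :: a) k hk1 (by simp only [List.length_cons]; omega),
      zeta_phi (0 :: b) k hk1 (by simp only [List.length_cons]; omega)]
    unfold Zf
    have hca : ∀ d ∈ k.divisors, phi (0 :: a) d = alphaF a d := by
      intro d hd
      obtain ⟨hdvd, hk0⟩ := Nat.mem_divisors.mp hd
      exact phi_cons a d (Nat.one_le_iff_ne_zero.mpr (fun h => hk0 (zero_dvd_iff.mp (h ▸ hdvd))))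
    have hcb : ∀ d ∈ k.divisors, phi (0 :: b) d = alphaF b d := by
      intro d hd
      obtain ⟨hdvd, hk0⟩ := Nat.mem_divisors.mp hd
      exact phi_cons b d (Nat.one_le_iff_ne_zero.mpr (fun h => hk0 (zero_dvd_iff.mp (h ▸ hdvd))))
    rw [Finset.sum_congr rfl hca, Finset.sum_congr rfl hcb]
  have hPbounds : ∀ x ∈ P, 0 ≤ x ∧ x < MD := by
    intro x hx
    rw [hP] at hx
    obtain ⟨vw, -, rfl⟩ := List.mem_map.mp hx
    exact modb _
  have hAphi : ∀ k, 1 ≤ k → k ≤ L → phi M k = FF a b k := by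
    intro k hk1 hkL
    rw [hM, mobius_phi P k hk1 (by omega)]
    have hc : ∀ x ∈ k.divisorsAntidiagonal,
        (ArithmeticFunction.moebius x.1) • phi P x.2
          = (ArithmeticFunction.moebius x.1) • (Zf a x.2 * Zf b x.2) := by
      intro x hx
      obtain ⟨hprod, hk0⟩ := Nat.mem_divisorsAntidiagonal.mp hx
      have hdvd : x.2 ∣ k := Dvd.intro_left _ hprod
      have hx20 : x.2 ≠ 0 := fun h => hk0 (by rw [← hprod, h, mul_zero])
      rw [hPphi x.2 (by omega) (le_trans (Nat.le_of_dvd (by omega) hdvd) hkL)]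
    rw [Finset.sum_congr rfl hc]
    exact mob_inv a b k (by omega)
  have hBphi : ∀ k, 1 ≤ k → k ≤ L → phi B k = FF a b k := by
    intro k hk1 hkL
    rw [hBdef, hBfacts.2 k hk1 hkL, phi_replicate, zero_add]
    exact FF_eq_Icc a b L k hk1 hkL
  have hAbounds : ∀ x ∈ M, 0 ≤ x ∧ x < MD := mobius_bounds P hPbounds
  have hBbounds : ∀ x ∈ B, 0 ≤ x ∧ x < MD := by
    rw [hBdef]
    refine foldl_bounds _ _ ?_ _ ?_
    · intro r i hr
      refine foldl_bounds _ _ ?_ r hr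
      intro r' j hr'
      intro x hx
      split_ifs at hx with h
      · exact set_mod_bounds _ _ _ hr' x hx
      · exact hr' x hx
    · intro x hx
      rw [List.eq_of_mem_replicate hx]
      constructor
      · rfl
      · norm_num [MD]
  apply List.ext_getElem
  · rw [List.length_drop, List.length_drop, hMlen, hBlen]
  · intro m hm1 hm2
    rw [List.length_drop, hMlen] at hm1
    have hkM : 1 + m < M.length := by omega
    have hkB : 1 + m < B.length := by omega
    rw [List.getElem_drop, List.getElem_drop]
    refine int_eq_of_cast _ _ (hAbounds _ (List.getElem_mem _)) (hBbounds _ (List.getElem_mem _)) ?_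
    rw [← phi_getElem M (1 + m) hkM, ← phi_getElem B (1 + m) hkB]
    rw [hAphi (1 + m) (by omega) (by omega), hBphi (1 + m) (by omega) (by omega)]
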